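-- pv_equiv track=rewrite | github.com/secretary-ias/receipt_dentabay | app/ui.py | _text_to_rtf
-- ===== SOURCE A (Python) =====
-- def _text_to_rtf(text: str) -> str:
--     if not text:
--         return ""
--     txt = text.replace("\r\n", "\n")
--     parts: list[str] = ["{\\rtf1\\ansi"]
--     for line in txt.split("\n"):
--         escaped = line.replace("\\", "\\\\").replace("{", "\\{").replace("}", "\\}")
--         parts.append(escaped + "\\par")
--     parts.append("}")
--     return "\n".join(parts)
-- ===== SOURCE B (Python) =====
-- def _text_to_rtf(text: str) -> str:
--     if not text:
--         return ""
--     txt = text.replace("\r\n", "\n")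
--     escaped = txt.replace("\\", "\\\\").replace("{", "\\{").replace("}", "\\}")
--     body = escaped.replace("\n", "\\par\n")
--     return "{\\rtf1\\ansi\n" + body + "\\par\n}"
-- ===== Notes on version B (the rewrite author's own statement) =====
-- stated objective: simpler
-- what changed: Replaces the line loop (split on newline, escape each line, append \par, join a parts list) by whole-string operations: escape the entire text once, then insert \par at every line boundary with a single replace and concatenate the fixed header/footer.
import Mathlib
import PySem

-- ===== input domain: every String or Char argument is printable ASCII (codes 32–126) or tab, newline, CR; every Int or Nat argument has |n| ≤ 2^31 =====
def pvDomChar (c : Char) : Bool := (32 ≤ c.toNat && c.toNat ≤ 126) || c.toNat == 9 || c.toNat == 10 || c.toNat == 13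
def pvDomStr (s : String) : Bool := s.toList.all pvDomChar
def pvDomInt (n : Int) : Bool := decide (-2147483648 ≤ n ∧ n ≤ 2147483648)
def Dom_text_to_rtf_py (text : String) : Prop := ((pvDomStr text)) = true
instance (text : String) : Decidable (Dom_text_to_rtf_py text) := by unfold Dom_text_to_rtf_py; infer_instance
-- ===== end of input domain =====

-- B replaces A's per-line loop (split, escape each line, append \par, join a parts list)
-- by whole-string passes: escape everything once, then one replace inserts \par at each newline.

-- ===== PORT A =====
def text_to_rtf_py (text : String) : String :=
  if text = "" then "" else
    let txt := PySem.Str.replace text "\r\n" "\n"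
    -- txt.split("\n"): sep ≠ "" so split? is some; getD just unwraps it
    let lines := (PySem.Str.split? txt "\n").getD []
    let parts := ["{\\rtf1\\ansi"] ++ lines.map (fun line =>
      PySem.Str.replace (PySem.Str.replace (PySem.Str.replace line "\\" "\\\\") "{" "\\{") "}" "\\}" ++ "\\par")
    PySem.Str.join "\n" (parts ++ ["}"])

-- ===== PORT B =====
def text_to_rtf_py_alt (text : String) : String :=
  if text = "" then "" else
    let txt := PySem.Str.replace text "\r\n" "\n"
    let escaped := PySem.Str.replace (PySem.Str.replace (PySem.Str.replace txt "\\" "\\\\") "{" "\\{") "}" "\\}"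
    let body := PySem.Str.replace escaped "\n" "\\par\n"
    "{\\rtf1\\ansi\n" ++ body ++ "\\par\n}"

-- ===== PRECONDITION & SPEC =====
def Spec_text_to_rtf_py (text : String) (out : String) : Prop := out = text_to_rtf_py_alt text
instance (text : String) (out : String) : Decidable (Spec_text_to_rtf_py text out) := by unfold Spec_text_to_rtf_py; infer_instance

-- ===== CLAIM (what is proved, stated in full; the proofs are below) =====
def Claim_equal_text_to_rtf_py : Prop := ∀ (text : String), Dom_text_to_rtf_py text → Spec_text_to_rtf_py text (text_to_rtf_py text)

-- ===== LEMMAS AND PROOFS =====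

-- per-char escape maps
def pvE1 (c : Char) : List Char := if c == '\\' then ['\\', '\\'] else [c]
def pvE2 (c : Char) : List Char := if c == '{' then ['\\', '{'] else [c]
def pvE3 (c : Char) : List Char := if c == '}' then ['\\', '}'] else [c]
def pvEsc (c : Char) : List Char :=
  if c == '\\' then ['\\', '\\'] else if c == '{' then ['\\', '{'] else if c == '}' then ['\\', '}'] else [c]
def pvPar : List Char := ['\\', 'p', 'a', 'r']
def pvEN (c : Char) : List Char := if c == '\n' then pvPar ++ ['\n'] else [c]
def pvG (c : Char) : List Char := if c == '\n' then pvPar ++ ['\n'] else pvEsc c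

-- replace with a single-character pattern is a flatMap
theorem pv_replace_go_single (o : Char) (new : List Char) :
    ∀ (l acc : List Char) (fuel : Nat), l.length ≤ fuel →
      PySem.Chars.replace.go [o] new fuel l acc
        = acc.reverse ++ l.flatMap (fun c => if c == o then new else [c]) := by
  intro l
  induction l with
  | nil =>
    intro acc fuel _
    cases fuel <;> simp [PySem.Chars.replace.go.eq_def]
  | cons c t ih =>
    intro acc fuel hf
    cases fuel with
    | zero => simp at hf
    | succ f =>
      rw [PySem.Chars.replace.go.eq_def]
      simp only [List.isPrefixOf, List.length_cons] at *
      by_cases h : c = o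
      · subst h
        simp [ih _ f (by omega)]
      · have ho : (o == c) = false := by simp [beq_eq_false_iff_ne]; exact Ne.symm h
        simp [ho, h, ih _ f (by omega)]

theorem pv_replace_single (s : List Char) (o : Char) (new : List Char) :
    PySem.Chars.replace s [o] new = s.flatMap (fun c => if c == o then new else [c]) := by
  rw [PySem.Chars.replace]
  simp [pv_replace_go_single o new s [] s.length (le_refl _)]

-- splitOn with a single-character separator is splitOnP
theorem pv_splitOn_go_single (o : Char) :
    ∀ (l cur : List Char) (acc : List (List Char)) (fuel : Nat), l.length < fuel →
      PySem.Chars.splitOn.go [o] fuel l cur acc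
        = acc.reverse ++ (List.splitOnP (· == o) l).modifyHead (cur.reverse ++ ·) := by
  intro l
  induction l with
  | nil =>
    intro cur acc fuel hf
    cases fuel with
    | zero => omega
    | succ f => simp [PySem.Chars.splitOn.go.eq_def, List.splitOnP_nil]
  | cons c t ih =>
    intro cur acc fuel hf
    cases fuel with
    | zero => omega
    | succ f =>
      rw [PySem.Chars.splitOn.go.eq_def]
      simp only [List.isPrefixOf, List.length_cons] at *
      obtain ⟨h, r, hr⟩ : ∃ h r, List.splitOnP (· == o) t = h :: r := by
        cases hsp : List.splitOnP (· == o) t with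
        | nil => exact absurd hsp (List.splitOnP_ne_nil _ _)
        | cons h r => exact ⟨h, r, rfl⟩
      by_cases hc : c = o
      · subst hc
        simp [ih [] (cur.reverse :: acc) f (by omega), List.splitOnP_cons, hr]
      · have ho : (o == c) = false := by simp [beq_eq_false_iff_ne]; exact Ne.symm hc
        simp [ho, hc, ih (c :: cur) acc f (by omega), List.splitOnP_cons, hr]

theorem pv_splitOn_single (s : List Char) (o : Char) :
    PySem.Chars.splitOn s [o] = List.splitOnP (· == o) s := by
  rw [PySem.Chars.splitOn]
  rw [pv_splitOn_go_single o s [] [] (s.length + 1) (by omega)]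
  obtain ⟨h, r, hr⟩ : ∃ h r, List.splitOnP (· == o) s = h :: r := by
    cases hsp : List.splitOnP (· == o) s with
    | nil => exact absurd hsp (List.splitOnP_ne_nil _ _)
    | cons h r => exact ⟨h, r, rfl⟩
  simp [hr]

-- the three successive escapes compose into one flatMap
theorem pv_escape3 (t : List Char) :
    ((t.flatMap pvE1).flatMap pvE2).flatMap pvE3 = t.flatMap pvEsc := by
  rw [List.flatMap_assoc, List.flatMap_assoc]
  apply List.flatMap_congr
  intro c _
  by_cases h1 : c == '\\'
  · have : c = '\\' := by simpa using h1
    subst this; decide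
  · by_cases h2 : c == '{'
    · have : c = '{' := by simpa using h2
      subst this; decide
    · by_cases h3 : c == '}'
      · have : c = '}' := by simpa using h3
        subst this; decide
      · have n1 : c ≠ '\\' := by simpa using h1
        have n2 : c ≠ '{' := by simpa using h2
        have n3 : c ≠ '}' := by simpa using h3
        simp [pvE1, pvE2, pvE3, pvEsc, n1, n2, n3]

-- inserting \par at newlines after escaping is one flatMap
theorem pv_escape_par (t : List Char) :
    (t.flatMap pvEsc).flatMap pvEN = t.flatMap pvG := by
  rw [List.flatMap_assoc]
  apply List.flatMap_congr
  intro c _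
  by_cases h1 : c == '\\'
  · have : c = '\\' := by simpa using h1
    subst this; decide
  · by_cases h2 : c == '{'
    · have : c = '{' := by simpa using h2
      subst this; decide
    · by_cases h3 : c == '}'
      · have : c = '}' := by simpa using h3
        subst this; decide
      · by_cases h4 : c == '\n'
        · have : c = '\n' := by simpa using h4
          subst this; decide
        · simp [pvEsc, pvEN, pvG, h1, h2, h3, h4]

theorem pv_intercalate_cons_cons (sep a b : List Char) (l : List (List Char)) :
    List.intercalate sep (a :: b :: l) = a ++ sep ++ List.intercalate sep (b :: l) := by
  simp [List.intercalate]

theorem pv_intercalate_head_append (sep x y : List Char) (l : List (List Char)) :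
    List.intercalate sep ((x ++ y) :: l) = x ++ List.intercalate sep (y :: l) := by
  cases l with
  | nil => simp [List.intercalate]
  | cons b l' => rw [pv_intercalate_cons_cons, pv_intercalate_cons_cons]; simp

theorem pv_intercalate_append_singleton (sep z : List Char) :
    ∀ (l : List (List Char)), l ≠ [] →
      List.intercalate sep (l ++ [z]) = List.intercalate sep l ++ sep ++ z := by
  intro l
  induction l with
  | nil => intro h; exact absurd rfl h
  | cons a l' ih =>
    intro _
    cases l' with
    | nil => simp [List.intercalate]
    | cons b l'' =>
      rw [show ((a :: b :: l'') ++ [z]) = a :: b :: (l'' ++ [z]) by simp,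
          pv_intercalate_cons_cons,
          show (b :: (l'' ++ [z])) = (b :: l'') ++ [z] by simp,
          ih (by simp), pv_intercalate_cons_cons]
      simp

-- the heart: joining escaped lines with "\par\n" equals one flatMap over the whole text
theorem pv_middle (t : List Char) :
    List.intercalate ['\n'] ((List.splitOnP (· == '\n') t).map (fun l => l.flatMap pvEsc ++ pvPar))
      = t.flatMap pvG ++ pvPar := by
  induction t with
  | nil => simp [List.splitOnP_nil, List.intercalate]
  | cons c t ih =>
    rw [List.splitOnP_cons]
    obtain ⟨h, r, hr⟩ : ∃ h r, List.splitOnP (· == '\n') t = h :: r := by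
      cases hsp : List.splitOnP (· == '\n') t with
      | nil => exact absurd hsp (List.splitOnP_ne_nil _ _)
      | cons h r => exact ⟨h, r, rfl⟩
    by_cases hc : c == '\n'
    · have : c = '\n' := by simpa using hc
      subst this
      simp only [show (('\n' : Char) == '\n') = true from rfl, if_true, List.map_cons,
        List.flatMap_nil, List.nil_append]
      simp only [hr, List.map_cons] at ih ⊢
      rw [pv_intercalate_cons_cons, ih]
      simp [pvG]
    · rw [if_neg (by simpa using hc), hr, List.modifyHead_cons, List.map_cons]
      rw [hr, List.map_cons] at ih
      have hstep : (c :: h).flatMap pvEsc ++ pvPar = pvEsc c ++ (h.flatMap pvEsc ++ pvPar) := by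
        rw [List.flatMap_cons, List.append_assoc]
      rw [hstep, pv_intercalate_head_append, ih]
      have hn : c ≠ '\n' := by simpa using hc
      simp [pvG, List.flatMap_cons, hn]

-- the triple escape at String level
theorem pv_escape_str (l : String) :
    (PySem.Str.replace (PySem.Str.replace (PySem.Str.replace l "\\" "\\\\") "{" "\\{") "}" "\\}").toList
      = l.toList.flatMap pvEsc := by
  simp only [PySem.Str.toList_replace]
  rw [show ("\\" : String).toList = ['\\'] from rfl, show ("{" : String).toList = ['{'] from rfl,
      show ("}" : String).toList = ['}'] from rfl]
  rw [pv_replace_single, pv_replace_single, pv_replace_single]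
  exact pv_escape3 _

-- Python's txt.split("\n") at String level
theorem pv_split_str (txt : String) :
    ∃ lines, PySem.Str.split? txt "\n" = some lines ∧
      lines.map String.toList = List.splitOnP (· == '\n') txt.toList := by
  have hb := PySem.Str.split?_map txt "\n"
  rw [show ("\n" : String).toList = ['\n'] from rfl, PySem.Chars.split?] at hb
  cases hq : PySem.Str.split? txt "\n" with
  | none => rw [hq] at hb; simp at hb
  | some lines =>
    rw [hq] at hb
    simp only [Option.map_some, List.isEmpty_cons, Bool.false_eq_true, if_false,
      Option.some.injEq] at hb
    exact ⟨lines, rfl, by rw [hb, pv_splitOn_single]⟩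

-- ===== VERDICT (by name: the statement is the Claim_ definition above) =====
theorem text_to_rtf_py_spec : Claim_equal_text_to_rtf_py := by
  intro text _
  unfold Spec_text_to_rtf_py text_to_rtf_py text_to_rtf_py_alt
  by_cases h : text = ""
  · simp [h]
  · simp only [if_neg h]
    rw [← String.toList_inj]
    obtain ⟨lines, hsome, hmap⟩ := pv_split_str (PySem.Str.replace text "\r\n" "\n")
    simp only [hsome, Option.getD_some, PySem.Str.toList_join, PySem.Chars.join,
      String.toList_append, List.map_append, List.map_cons, List.map_nil, List.map_map,
      List.singleton_append]
    have hel : (List.map (String.toList ∘ fun line =>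
          PySem.Str.replace (PySem.Str.replace (PySem.Str.replace line "\\" "\\\\") "{" "\\{") "}" "\\}"
            ++ "\\par") lines)
        = (lines.map String.toList).map (fun l => l.flatMap pvEsc ++ pvPar) := by
      rw [List.map_map]
      apply List.map_congr_left
      intro l _
      simp only [Function.comp, String.toList_append, pv_escape_str]
      rfl
    rw [hel, hmap]
    obtain ⟨hd, tl, htl⟩ : ∃ hd tl,
        List.splitOnP (· == '\n') (PySem.Str.replace text "\r\n" "\n").toList = hd :: tl := by
      cases hsp : List.splitOnP (· == '\n') (PySem.Str.replace text "\r\n" "\n").toList with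
      | nil => exact absurd hsp (List.splitOnP_ne_nil _ _)
      | cons hd tl => exact ⟨hd, tl, rfl⟩
    -- left side: peel the header, then the trailing "}"
    rw [show ("\n" : String).toList = ['\n'] from rfl]
    rw [htl, List.map_cons]
    rw [pv_intercalate_append_singleton _ _ _ (by simp), pv_intercalate_cons_cons]
    rw [show ((List.flatMap pvEsc hd ++ pvPar) :: List.map (fun l => List.flatMap pvEsc l ++ pvPar) tl)
        = List.map (fun l => List.flatMap pvEsc l ++ pvPar) (hd :: tl) from rfl]
    rw [← htl, pv_middle]
    -- right side: the escape then the \par insertion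
    simp only [PySem.Str.toList_replace]
    rw [show ("\\" : String).toList = ['\\'] from rfl, show ("{" : String).toList = ['{'] from rfl,
        show ("}" : String).toList = ['}'] from rfl, show ("\n" : String).toList = ['\n'] from rfl]
    rw [pv_replace_single, pv_replace_single, pv_replace_single, pv_replace_single]
    rw [show (fun c => if c == '\\' then ("\\\\" : String).toList else [c]) = pvE1 from rfl,
        show (fun c => if c == '{' then ("\\{" : String).toList else [c]) = pvE2 from rfl,
        show (fun c => if c == '}' then ("\\}" : String).toList else [c]) = pvE3 from rfl,
        show (fun c => if c == '\n' then ("\\par\n" : String).toList else [c]) = pvEN from rfl]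
    rw [pv_escape3, pv_escape_par]
    rw [show ("{\\rtf1\\ansi\n" : String).toList = "{\\rtf1\\ansi".toList ++ ['\n'] from rfl,
        show ("\\par\n}" : String).toList = pvPar ++ ['\n'] ++ "}".toList from rfl]
    simp [List.append_assoc]
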